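-- pv_equiv track=rewrite | github.com/mikaelvincent/intrinsic-rl | code/irl/cfg/loader.py | _nearest_divisor_suggestions
-- ===== SOURCE A (Python) =====
-- def _nearest_divisor_suggestions(
--     target: int, candidates: list[int]
-- ) -> tuple[int | None, int | None]:
--     if not candidates:
--         return None, None
--     lower = None
--     higher = None
--     for d in candidates:
--         if d < target:
--             lower = d
--         elif d > target and higher is None:
--             higher = d
--             break
--     return lower, higher
-- ===== SOURCE B (Python) =====
-- def _nearest_divisor_suggestions(target, candidates):
--     cut = next((i for i, d in enumerate(candidates) if d > target), len(candidates))
--     higher = candidates[cut] if cut < len(candidates) else None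
--     lower = next((d for d in reversed(candidates[:cut]) if d < target), None)
--     return lower, higher
-- ===== Notes on version B (the rewrite author's own statement) =====
-- stated objective: alternative
-- what changed: B replaces A's single stateful loop (tracking lower while scanning for a break point) by a split computation: find the cut index of the first element > target, read higher there, then scan the prefix backwards for the first element < target.
import Mathlib
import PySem

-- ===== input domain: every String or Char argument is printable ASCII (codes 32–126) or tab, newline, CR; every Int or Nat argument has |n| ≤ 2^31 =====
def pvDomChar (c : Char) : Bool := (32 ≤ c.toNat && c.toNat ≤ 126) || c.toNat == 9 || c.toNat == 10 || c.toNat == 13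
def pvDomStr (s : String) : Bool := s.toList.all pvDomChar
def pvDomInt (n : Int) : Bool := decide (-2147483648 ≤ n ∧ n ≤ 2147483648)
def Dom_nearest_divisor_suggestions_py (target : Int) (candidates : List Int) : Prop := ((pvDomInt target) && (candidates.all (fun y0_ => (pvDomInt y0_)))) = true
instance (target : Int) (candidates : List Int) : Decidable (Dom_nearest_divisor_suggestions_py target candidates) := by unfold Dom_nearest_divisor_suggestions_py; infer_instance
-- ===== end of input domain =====

-- B computes the same value by a different decomposition (cut index + backward scan) instead of
-- A's stateful forward loop; same O(n) cost, equivalence proved on all inputs (both are total).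

-- ===== PORT A =====
-- the for-loop of A, carrying the loop state (lower, higher); the `break` is the early return
def aLoop (target : Int) : List Int → Option Int → Option Int → Option Int × Option Int
  | [], lower, higher => (lower, higher)
  | d :: rest, lower, higher =>
    if d < target then aLoop target rest (some d) higher
    else if d > target && higher.isNone then (lower, some d)
    else aLoop target rest lower higher

def nearest_divisor_suggestions_py (target : Int) (candidates : List Int) : Option Int × Option Int :=
  if candidates = [] then (none, none)
  else aLoop target candidates none none

-- ===== PORT B =====
-- next((i for i, d in enumerate(candidates) if d > target), len(candidates))
def bCut (target : Int) : List Int → Nat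
  | [] => 0
  | d :: rest => if d > target then 0 else bCut target rest + 1

-- next((d for d in xs if d < target), None)
def bFirstLower (target : Int) : List Int → Option Int
  | [] => none
  | d :: rest => if d < target then some d else bFirstLower target rest

def nearest_divisor_suggestions_py_alt (target : Int) (candidates : List Int) : Option Int × Option Int :=
  let cut := bCut target candidates
  let higher := candidates[cut]?   -- candidates[cut] if cut < len(candidates) else None
  let lower := bFirstLower target (candidates.take cut).reverse
  (lower, higher)

-- ===== PRECONDITION & SPEC =====
def Spec_nearest_divisor_suggestions_py (target : Int) (candidates : List Int) (out : Option Int × Option Int) : Prop := out = nearest_divisor_suggestions_py_alt target candidates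
instance (target : Int) (candidates : List Int) (out : Option Int × Option Int) : Decidable (Spec_nearest_divisor_suggestions_py target candidates out) := by unfold Spec_nearest_divisor_suggestions_py; infer_instance

-- ===== CLAIM (what is proved, stated in full; the proofs are below) =====
def Claim_equal_nearest_divisor_suggestions_py : Prop := ∀ (target : Int) (candidates : List Int), Dom_nearest_divisor_suggestions_py target candidates → Spec_nearest_divisor_suggestions_py target candidates (nearest_divisor_suggestions_py target candidates)

-- ===== LEMMAS AND PROOFS =====
theorem bFirstLower_append (target d : Int) (l : List Int) :
    bFirstLower target (l ++ [d]) =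
      ((bFirstLower target l).or (if d < target then some d else none)) := by
  induction l with
  | nil => simp [bFirstLower]
  | cons x xs ih =>
    simp only [List.cons_append, bFirstLower]
    by_cases h : x < target
    · simp [h]
    · simp only [if_neg h, ih]

theorem aLoop_eq (target : Int) (xs : List Int) : ∀ (lower : Option Int),
    aLoop target xs lower none =
      ((bFirstLower target ((xs.take (bCut target xs)).reverse)).or lower,
        xs[bCut target xs]?) := by
  induction xs with
  | nil => intro lower; simp [aLoop, bCut, bFirstLower]
  | cons d rest ih =>
    intro lower
    by_cases hgt : d > target
    · have hlt : ¬ d < target := by omega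
      simp [aLoop, bCut, hgt, hlt, bFirstLower]
    · have hcut : bCut target (d :: rest) = bCut target rest + 1 := by
        simp [bCut, hgt]
      by_cases hlt : d < target
      · have : (rest.take (bCut target rest) ++ [d]).reverse.reverse
            = rest.take (bCut target rest) ++ [d] := by simp
        simp only [aLoop, if_pos hlt, hcut, List.take_succ_cons,
          List.reverse_cons, ih (some d), List.getElem?_cons_succ]
        rw [bFirstLower_append]
        simp [hlt]
      · simp only [aLoop, if_neg hlt, hgt, decide_false, Bool.false_and,
          if_neg (Bool.false_ne_true), hcut, List.take_succ_cons,
          List.reverse_cons, ih lower, List.getElem?_cons_succ]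
        rw [bFirstLower_append]
        simp [hlt]

-- ===== VERDICT (by name: the statement is the Claim_ definition above) =====
theorem nearest_divisor_suggestions_py_spec : Claim_equal_nearest_divisor_suggestions_py := by
  intro target candidates _
  unfold Spec_nearest_divisor_suggestions_py nearest_divisor_suggestions_py
    nearest_divisor_suggestions_py_alt
  by_cases h : candidates = []
  · subst h; simp [bCut, bFirstLower]
  · simp only [if_neg h, aLoop_eq, Option.or_none]
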